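-- pv_equiv track=rewrite | github.com/Zyooon/rag-system-py | prompts/prompt_template.py | extract_key_information
-- ===== SOURCE A (Python) =====
-- def extract_key_information(context: str, max_length: int = 1000) -> str:
--     """
--     컨텍스트에서 핵심 정보 추출
--
--     Args:
--         context: 원본 컨텍스트
--         max_length: 최대 길이
--
--     Returns:
--         추출된 핵심 정보
--     """
--     if len(context) <= max_length:
--         return context
--
--     # 문장 단위로 분리하여 중요한 부분 선택
--     sentences = context.split('. ')
--     key_sentences = []
--     current_length = 0
--
--     for sentence in sentences:
--         if current_length + len(sentence) + 2 <= max_length: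
--             key_sentences.append(sentence.strip())
--             current_length += len(sentence) + 2
--         else:
--             break
--
--     return '. '.join(key_sentences) + '.'
-- ===== SOURCE B (Python) =====
-- from itertools import accumulate
-- from bisect import bisect_right
--
--
-- def extract_key_information(context: str, max_length: int = 1000) -> str:
--     if len(context) <= max_length:
--         return context
--     sentences = context.split('. ')
--     cumulative = list(accumulate(len(s) + 2 for s in sentences))
--     count = bisect_right(cumulative, max_length)
--     return '. '.join(s.strip() for s in sentences[:count]) + '.'
-- ===== Notes on version B (the rewrite author's own statement) =====
-- stated objective: alternative
-- what changed: Replaces A's greedy accumulate-and-break loop with a prefix-sum table of cumulative sentence costs (itertools.accumulate) plus a bisect_right binary search for the count of leading sentences that fit, then builds the result from that count.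
import Mathlib
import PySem

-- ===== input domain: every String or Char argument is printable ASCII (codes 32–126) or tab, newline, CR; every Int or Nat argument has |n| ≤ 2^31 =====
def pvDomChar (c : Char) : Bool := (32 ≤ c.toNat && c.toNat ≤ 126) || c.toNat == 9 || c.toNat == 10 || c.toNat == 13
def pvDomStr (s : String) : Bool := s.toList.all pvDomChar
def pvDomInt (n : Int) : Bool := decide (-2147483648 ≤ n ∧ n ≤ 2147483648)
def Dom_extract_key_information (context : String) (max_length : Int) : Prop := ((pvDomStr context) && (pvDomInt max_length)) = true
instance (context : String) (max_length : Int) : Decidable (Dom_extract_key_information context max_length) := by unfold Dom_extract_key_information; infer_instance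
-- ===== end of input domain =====

-- ===== PORT A =====
-- B re-implements A's greedy sentence loop as prefix-sums + binary search; objective: alternative (same asymptotic cost).
-- loop of A: greedily take sentences while the running length budget allows, stripping each
def ekiLoop (max_length : Int) : List String → Int → List String
  | [], _ => []
  | s :: rest, cur =>
    if cur + PySem.Str.len s + 2 ≤ max_length then
      PySem.Str.strip s :: ekiLoop max_length rest (cur + PySem.Str.len s + 2)
    else []

def extract_key_information (context : String) (max_length : Int) : String :=
  if PySem.Str.len context ≤ max_length then context
  else
    let sentences := (PySem.Str.split? context ". ").getD []
    PySem.Str.join ". " (ekiLoop max_length sentences 0) ++ "."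

-- ===== PORT B =====
-- itertools.accumulate over the running sum (ported by hand, step for step; exact)
def ekiAccumulate : List Int → Int → List Int
  | [], _ => []
  | x :: rest, acc => (acc + x) :: ekiAccumulate rest (acc + x)

def extract_key_information_alt (context : String) (max_length : Int) : String :=
  if PySem.Str.len context ≤ max_length then context
  else
    let sentences := (PySem.Str.split? context ". ").getD []
    let cumulative := ekiAccumulate (sentences.map (fun s => PySem.Str.len s + 2)) 0
    let count := PySem.List.bisectRight cumulative max_length
    PySem.Str.join ". " ((sentences.take count).map PySem.Str.strip) ++ "."

-- ===== PRECONDITION & SPEC =====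
def Spec_extract_key_information (context : String) (max_length : Int) (out : String) : Prop := out = extract_key_information_alt context max_length
instance (context : String) (max_length : Int) (out : String) : Decidable (Spec_extract_key_information context max_length out) := by unfold Spec_extract_key_information; infer_instance

-- ===== CLAIM (what is proved, stated in full; the proofs are below) =====
def Claim_equal_extract_key_information : Prop := ∀ (context : String) (max_length : Int), Dom_extract_key_information context max_length → Spec_extract_key_information context max_length (extract_key_information context max_length)

-- ===== LEMMAS AND PROOFS =====

theorem ekiAccumulate_length (xs : List Int) (acc : Int) :
    (ekiAccumulate xs acc).length = xs.length := by
  induction xs generalizing acc with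
  | nil => rfl
  | cons x rest ih => simpa [ekiAccumulate] using ih (acc + x)

theorem ekiAccumulate_mem_ge (xs : List Int) (acc : Int) (h : ∀ x ∈ xs, 0 ≤ x) :
    ∀ y ∈ ekiAccumulate xs acc, acc ≤ y := by
  induction xs generalizing acc with
  | nil => simp [ekiAccumulate]
  | cons x rest ih =>
    intro y hy
    have hx : 0 ≤ x := h x (by simp)
    rcases (by simpa [ekiAccumulate] using hy : y = acc + x ∨ y ∈ ekiAccumulate rest (acc + x)) with h1 | h1
    · omega
    · have := ih (acc + x) (fun z hz => h z (by simp [hz])) y h1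
      omega

theorem ekiAccumulate_pairwise (xs : List Int) (acc : Int) (h : ∀ x ∈ xs, 0 ≤ x) :
    (ekiAccumulate xs acc).Pairwise (fun a b => a ≤ b) := by
  induction xs generalizing acc with
  | nil => simp [ekiAccumulate]
  | cons x rest ih =>
    refine List.Pairwise.cons ?_ (ih (acc + x) (fun z hz => h z (by simp [hz])))
    intro y hy
    exact ekiAccumulate_mem_ge rest (acc + x) (fun z hz => h z (by simp [hz])) y hy

-- the loop of A stops exactly at any index k with: all prefix sums before k fit, the k-th (if any) does not
theorem ekiLoop_eq_take (max_length : Int) (sents : List String) (cur : Int) (k : Nat)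
    (hk : k ≤ sents.length)
    (hle : ∀ j, (hj : j < sents.length) → j < k →
      (ekiAccumulate (sents.map (fun s => PySem.Str.len s + 2)) cur)[j]'(by
        rw [ekiAccumulate_length]; simpa using hj) ≤ max_length)
    (hgt : ∀ j, (hj : j < sents.length) → k ≤ j →
      max_length < (ekiAccumulate (sents.map (fun s => PySem.Str.len s + 2)) cur)[j]'(by
        rw [ekiAccumulate_length]; simpa using hj)) :
    ekiLoop max_length sents cur = (sents.take k).map PySem.Str.strip := by
  induction sents generalizing cur k with
  | nil => simp [ekiLoop]
  | cons s rest ih =>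
    have heq : cur + (PySem.Str.len s + 2) = cur + PySem.Str.len s + 2 := by ring
    cases k with
    | zero =>
      have h0 := hgt 0 (by simp) (by omega)
      simp only [List.map_cons, ekiAccumulate, List.getElem_cons_zero] at h0
      have hneg : ¬ (cur + PySem.Str.len s + 2 ≤ max_length) := by omega
      simp only [ekiLoop, List.take_zero, List.map_nil]
      rw [if_neg hneg]
    | succ k' =>
      have h0 := hle 0 (by simp) (by omega)
      simp only [List.map_cons, ekiAccumulate, List.getElem_cons_zero] at h0
      have hcond : cur + PySem.Str.len s + 2 ≤ max_length := by omega
      have ihr := ih (cur + PySem.Str.len s + 2) k' (by simpa using hk)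
        (fun j hj hjk => by
          have h1 := hle (j + 1) (by simpa using Nat.succ_lt_succ hj) (by omega)
          simp only [List.map_cons, ekiAccumulate, List.getElem_cons_succ, heq] at h1
          exact h1)
        (fun j hj hjk => by
          have h1 := hgt (j + 1) (by simpa using Nat.succ_lt_succ hj) (by omega)
          simp only [List.map_cons, ekiAccumulate, List.getElem_cons_succ, heq] at h1
          exact h1)
      simp only [ekiLoop, List.take_succ_cons, List.map_cons]
      rw [if_pos hcond, ihr]

-- ===== VERDICT (by name: the statement is the Claim_ definition above) =====
theorem extract_key_information_spec : Claim_equal_extract_key_information := by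
  intro context max_length _
  unfold Spec_extract_key_information extract_key_information extract_key_information_alt
  by_cases hlen : PySem.Str.len context ≤ max_length
  · rw [if_pos hlen, if_pos hlen]
  · rw [if_neg hlen, if_neg hlen]
    set sents := (PySem.Str.split? context ". ").getD [] with hs
    set cum := ekiAccumulate (sents.map (fun s => PySem.Str.len s + 2)) 0 with hcum
    have hnn : ∀ x ∈ sents.map (fun s => PySem.Str.len s + 2), 0 ≤ x := by
      intro x hx
      rcases List.mem_map.mp hx with ⟨s, _, rfl⟩
      have := PySem.Str.len_eq s
      omega
    have hsorted : cum.Pairwise (fun a b => a ≤ b) :=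
      ekiAccumulate_pairwise _ 0 hnn
    obtain ⟨hkle, hle, hgt⟩ := PySem.List.bisectRight_spec cum max_length hsorted
    have hclen : cum.length = sents.length := by
      rw [hcum, ekiAccumulate_length, List.length_map]
    show PySem.Str.join ". " (ekiLoop max_length sents 0) ++ "." =
      PySem.Str.join ". " (List.map PySem.Str.strip
        (List.take (PySem.List.bisectRight cum max_length) sents)) ++ "."
    rw [ekiLoop_eq_take max_length sents 0 (PySem.List.bisectRight cum max_length)
      (by omega)
      (fun j hj hjk => hle j (by omega) hjk)
      (fun j hj hjk => hgt j (by omega) hjk)]
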